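-- pv_equiv track=rewrite | github.com/Prostream/leetCodePractice | werideOA/imageFilter.py | getMinProcessingCost
-- ===== SOURCE A (Python) =====
-- from collections import defaultdict
--
-- MOD = 10**7+9
--
-- def getMinProcessingCost(filterCost, startDay, endDay, discountPrice):
--     event = defaultdict(int)
--     n = len(filterCost)
--     for i in range(n):
--         event[startDay[i]] += filterCost[i]
--         event[endDay[i] + 1] -= filterCost[i]
--
--     ans = 0
--     prev_day = None
--     runningCost = 0
--     days = sorted(event.keys())
--     for day in days:
--         if prev_day is not None:
--             cost = min(discountPrice, runningCost)
--             length = day - prev_day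
--             ans = (ans + cost * length)%MOD
--         prev_day = day
--         runningCost += event[day]
--     return ans
-- ===== SOURCE B (Python) =====
-- MOD = 10**7 + 9
--
-- def getMinProcessingCost(filterCost, startDay, endDay, discountPrice):
--     n = len(filterCost)
--     bounds = sorted(set(startDay[:n]) | {e + 1 for e in endDay[:n]})
--     ans = 0
--     for d1, d2 in zip(bounds, bounds[1:]):
--         active = sum(c * ((s <= d1) - (e + 1 <= d1))
--                      for c, s, e in zip(filterCost, startDay, endDay))
--         ans = (ans + min(discountPrice, active) * (d2 - d1)) % MOD
--     return ans
-- ===== Notes on version B (the rewrite author's own statement) =====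
-- stated objective: alternative
-- what changed: B drops the delta-dictionary sweep entirely: it sorts the distinct boundary days (set of startDay and endDay+1) and, for each consecutive boundary pair, recomputes the active cost by a direct scan over the filters with signed indicator arithmetic, instead of A's defaultdict of deltas with an incrementally maintained runningCost.
import Mathlib
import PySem

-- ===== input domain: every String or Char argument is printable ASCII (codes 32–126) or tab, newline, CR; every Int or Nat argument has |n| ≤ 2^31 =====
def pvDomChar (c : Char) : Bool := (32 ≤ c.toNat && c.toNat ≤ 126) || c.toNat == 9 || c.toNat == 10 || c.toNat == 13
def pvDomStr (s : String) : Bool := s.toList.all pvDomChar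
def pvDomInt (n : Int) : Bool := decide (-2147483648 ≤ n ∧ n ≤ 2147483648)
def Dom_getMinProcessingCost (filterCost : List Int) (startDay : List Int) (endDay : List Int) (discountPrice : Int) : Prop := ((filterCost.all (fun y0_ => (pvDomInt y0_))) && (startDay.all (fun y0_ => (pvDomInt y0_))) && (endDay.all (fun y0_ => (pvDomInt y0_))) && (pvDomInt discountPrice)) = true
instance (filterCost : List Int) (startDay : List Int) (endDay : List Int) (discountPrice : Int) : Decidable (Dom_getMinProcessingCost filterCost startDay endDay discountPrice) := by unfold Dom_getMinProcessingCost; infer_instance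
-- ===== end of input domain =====

-- B replaces A's delta-dictionary sweep by sorting the distinct boundary days and recomputing the
-- active cost of each boundary segment with a direct scan over the filters (objective: alternative).

-- ===== PORT A =====
def getMinProcessingCost (filterCost : List Int) (startDay : List Int) (endDay : List Int) (discountPrice : Int) : Int :=
  let n : Int := filterCost.length
  let event : PySem.Dict Int Int :=
    (PySem.List.pyRange 0 n 1).foldl (fun ev i =>
      (ev.modify (PySem.List.pyGetD startDay i 0) 0
          (fun v => v + PySem.List.pyGetD filterCost i 0)).modify
        (PySem.List.pyGetD endDay i 0 + 1) 0
          (fun v => v - PySem.List.pyGetD filterCost i 0)) PySem.Dict.empty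
  let days := PySem.List.sorted event.keys (fun x => x) false
  let res := days.foldl (fun (st : Int × Option Int × Int) day =>
      match st.2.1 with
      | some p => (PySem.Int.mod (st.1 + (min discountPrice st.2.2) * (day - p)) 10000009,
                   some day, st.2.2 + event.getD day 0)
      | none => (st.1, some day, st.2.2 + event.getD day 0)) (0, none, 0)
  res.1

-- ===== PORT B =====
def pvActive (filterCost : List Int) (startDay : List Int) (endDay : List Int) (d : Int) : Int :=
  ((filterCost.zip (startDay.zip endDay)).map (fun t =>
    t.1 * ((if t.2.1 ≤ d then (1:Int) else 0) - (if t.2.2 + 1 ≤ d then (1:Int) else 0)))).sum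

def getMinProcessingCost_alt (filterCost : List Int) (startDay : List Int) (endDay : List Int) (discountPrice : Int) : Int :=
  let n : Int := filterCost.length
  let bounds := PySem.List.sorted
    (PySem.Set.union (PySem.Set.ofList (PySem.List.slice startDay none (some n)))
      (PySem.Set.ofList ((PySem.List.slice endDay none (some n)).map (fun e => e + 1))))
    (fun x => x) false
  (bounds.zip bounds.tail).foldl (fun ans p =>
    PySem.Int.mod (ans + (min discountPrice (pvActive filterCost startDay endDay p.1)) * (p.2 - p.1)) 10000009) 0

-- ===== PRECONDITION & SPEC =====
-- Pre_ excludes exactly the inputs on which A raises IndexError: startDay or endDay shorter than filterCost.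
def Pre_getMinProcessingCost (filterCost : List Int) (startDay : List Int) (endDay : List Int) (discountPrice : Int) : Prop :=
  filterCost.length ≤ startDay.length ∧ filterCost.length ≤ endDay.length
instance (filterCost : List Int) (startDay : List Int) (endDay : List Int) (discountPrice : Int) : Decidable (Pre_getMinProcessingCost filterCost startDay endDay discountPrice) := by unfold Pre_getMinProcessingCost; infer_instance
def pvWitness_getMinProcessingCost : List Int × List Int × List Int × Int := ([3, 4], [1, 2], [3, 3], 5)

def Spec_getMinProcessingCost (filterCost : List Int) (startDay : List Int) (endDay : List Int) (discountPrice : Int) (out : Int) : Prop := out = getMinProcessingCost_alt filterCost startDay endDay discountPrice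
instance (filterCost : List Int) (startDay : List Int) (endDay : List Int) (discountPrice : Int) (out : Int) : Decidable (Spec_getMinProcessingCost filterCost startDay endDay discountPrice out) := by unfold Spec_getMinProcessingCost; infer_instance

-- ===== CLAIM (what is proved, stated in full; the proofs are below) =====
def Claim_equal_getMinProcessingCost : Prop := ∀ (filterCost : List Int) (startDay : List Int) (endDay : List Int) (discountPrice : Int), Dom_getMinProcessingCost filterCost startDay endDay discountPrice → Pre_getMinProcessingCost filterCost startDay endDay discountPrice → Spec_getMinProcessingCost filterCost startDay endDay discountPrice (getMinProcessingCost filterCost startDay endDay discountPrice)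

-- ===== LEMMAS AND PROOFS =====

-- the (day, delta) events of A's building loop, flattened to a list
def pvPairs (zl : List (Int × Int × Int)) : List (Int × Int) :=
  zl.flatMap (fun t => [(t.2.1, t.1), (t.2.2 + 1, -t.1)])

-- the net delta at day k (what A's dict stores at key k)
def pvE (zl : List (Int × Int × Int)) (k : Int) : Int :=
  (zl.map (fun t =>
    t.1 * ((if t.2.1 = k then (1:Int) else 0) - (if t.2.2 + 1 = k then (1:Int) else 0)))).sum

-- the running cost at day d (what B recomputes for each segment); pvActive in curried form
def pvR (zl : List (Int × Int × Int)) (d : Int) : Int :=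
  (zl.map (fun t =>
    t.1 * ((if t.2.1 ≤ d then (1:Int) else 0) - (if t.2.2 + 1 ≤ d then (1:Int) else 0)))).sum

lemma pvActive_eq (filterCost startDay endDay : List Int) (d : Int) :
    pvActive filterCost startDay endDay d = pvR (filterCost.zip (startDay.zip endDay)) d := rfl

lemma pv_getD_foldl_modify (l : List (Int × Int)) (d : PySem.Dict Int Int) (k : Int) :
    (l.foldl (fun d p => d.modify p.1 0 (fun v => v + p.2)) d).getD k 0
      = d.getD k 0 + ((l.filter (fun p => p.1 == k)).map (·.2)).sum := by
  induction l generalizing d with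
  | nil => simp
  | cons p l ih =>
    rw [List.foldl_cons, ih]
    by_cases h : p.1 = k
    · simp [h]; ring
    · simp [h, PySem.Dict.getD_modify, Ne.symm h]

lemma pv_filter_sum_eq_E (zl : List (Int × Int × Int)) (k : Int) :
    (((pvPairs zl).filter (fun p => p.1 == k)).map (·.2)).sum = pvE zl k := by
  induction zl with
  | nil => simp [pvPairs, pvE]
  | cons t zl ih =>
    simp only [pvPairs, pvE, List.flatMap_cons, List.filter_append, List.map_append,
      List.sum_append, List.map_cons, List.sum_cons] at *
    rw [ih]
    by_cases h1 : t.2.1 = k <;> by_cases h2 : t.2.2 + 1 = k <;>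
      simp [h1, h2]

lemma pv_build_aux (filterCost startDay endDay : List Int)
    (hs : filterCost.length ≤ startDay.length) (he : filterCost.length ≤ endDay.length)
    (m : Nat) (hm : m ≤ filterCost.length) :
    (PySem.List.pyRange 0 (m : Int) 1).foldl (fun ev i =>
      (ev.modify (PySem.List.pyGetD startDay i 0) 0
          (fun v => v + PySem.List.pyGetD filterCost i 0)).modify
        (PySem.List.pyGetD endDay i 0 + 1) 0
          (fun v => v - PySem.List.pyGetD filterCost i 0)) PySem.Dict.empty
    = (pvPairs ((filterCost.zip (startDay.zip endDay)).take m)).foldl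
        (fun d p => d.modify p.1 0 (fun v => v + p.2)) PySem.Dict.empty := by
  induction m with
  | zero => simp [pvPairs]
  | succ m ih =>
    have hz : m < (filterCost.zip (startDay.zip endDay)).length := by
      simp [List.length_zip]; omega
    have hstep : PySem.List.pyRange 0 ((m + 1 : Nat) : Int) 1
        = PySem.List.pyRange 0 (m : Int) 1 ++ [(m : Int)] := by
      push_cast
      exact PySem.List.pyRange_one_succ_right (by positivity)
    have htake : (filterCost.zip (startDay.zip endDay)).take (m + 1)
        = (filterCost.zip (startDay.zip endDay)).take m
          ++ [(filterCost.zip (startDay.zip endDay))[m]] := by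
      rw [List.take_add_one]
      simp [List.getElem?_eq_getElem hz]
    rw [hstep, htake, List.foldl_append, ih (by omega)]
    have hgz : (filterCost.zip (startDay.zip endDay))[m]
        = (filterCost[m]'(by omega), (startDay[m]'(by omega), endDay[m]'(by omega))) := by
      simp [List.getElem_zip]
    simp only [pvPairs, List.flatMap_append, List.foldl_append, hgz]
    simp only [List.flatMap_cons, List.flatMap_nil, List.append_nil, List.foldl_cons,
      List.foldl_nil]
    have h1 : PySem.List.pyGetD startDay (m : Int) 0 = startDay[m]'(by omega) := by
      have hlt : m < startDay.length := by omega
      simp [PySem.List.pyGetD_natCast, List.getElem?_eq_getElem hlt]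
    have h2 : PySem.List.pyGetD endDay (m : Int) 0 = endDay[m]'(by omega) := by
      have hlt : m < endDay.length := by omega
      simp [PySem.List.pyGetD_natCast, List.getElem?_eq_getElem hlt]
    have h3 : PySem.List.pyGetD filterCost (m : Int) 0 = filterCost[m]'(by omega) := by
      have hlt : m < filterCost.length := by omega
      simp [PySem.List.pyGetD_natCast, List.getElem?_eq_getElem hlt]
    rw [h1, h2, h3]
    simp only [sub_eq_add_neg]

lemma pv_build_eq (filterCost startDay endDay : List Int)
    (hs : filterCost.length ≤ startDay.length) (he : filterCost.length ≤ endDay.length) :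
    (PySem.List.pyRange 0 (filterCost.length : Int) 1).foldl (fun ev i =>
      (ev.modify (PySem.List.pyGetD startDay i 0) 0
          (fun v => v + PySem.List.pyGetD filterCost i 0)).modify
        (PySem.List.pyGetD endDay i 0 + 1) 0
          (fun v => v - PySem.List.pyGetD filterCost i 0)) PySem.Dict.empty
    = (pvPairs (filterCost.zip (startDay.zip endDay))).foldl
        (fun d p => d.modify p.1 0 (fun v => v + p.2)) PySem.Dict.empty := by
  have h := pv_build_aux filterCost startDay endDay hs he filterCost.length le_rfl
  rwa [List.take_of_length_le (by simp [List.length_zip])] at h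

lemma pv_keys (l : List (Int × Int)) :
    (l.foldl (fun d p => d.modify p.1 0 (fun v => v + p.2)) PySem.Dict.empty).keys
      = PySem.Set.ofList (l.map (·.1)) := by
  rw [PySem.Dict.keys_foldl_modify_key l (fun p => p.1) (0 : Int)
    (fun _ p => (fun v => v + p.2)) PySem.Dict.empty]
  simp [PySem.Set.ofList_eq_foldl, PySem.Set.update]

lemma pv_nodup_keys (l : List (Int × Int)) :
    (l.foldl (fun d p => d.modify p.1 0 (fun v => v + p.2)) PySem.Dict.empty).keys.Nodup :=
  PySem.Dict.nodup_keys_foldl_modify_key l (fun p => p.1) (0 : Int)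
    (fun _ p => (fun v => v + p.2)) PySem.Dict.empty (by simp)

lemma pv_mem_pairs_fst (zl : List (Int × Int × Int)) (x : Int) :
    x ∈ (pvPairs zl).map (·.1) ↔ ∃ t ∈ zl, x = t.2.1 ∨ x = t.2.2 + 1 := by
  rw [List.mem_map]
  constructor
  · rintro ⟨p, hp, rfl⟩
    rw [pvPairs, List.mem_flatMap] at hp
    obtain ⟨t, ht, hm⟩ := hp
    simp only [List.mem_cons, List.not_mem_nil, or_false] at hm
    rcases hm with rfl | rfl
    · exact ⟨t, ht, Or.inl rfl⟩
    · exact ⟨t, ht, Or.inr rfl⟩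
  · rintro ⟨t, ht, rfl | rfl⟩
    · refine ⟨(t.2.1, t.1), ?_, rfl⟩
      rw [pvPairs, List.mem_flatMap]
      exact ⟨t, ht, by simp⟩
    · refine ⟨(t.2.2 + 1, -t.1), ?_, rfl⟩
      rw [pvPairs, List.mem_flatMap]
      exact ⟨t, ht, by simp⟩

lemma pv_mem_zip (filterCost startDay endDay : List Int)
    (hs : filterCost.length ≤ startDay.length) (he : filterCost.length ≤ endDay.length) (x : Int) :
    (∃ t ∈ filterCost.zip (startDay.zip endDay), x = t.2.1 ∨ x = t.2.2 + 1)
      ↔ x ∈ startDay.take filterCost.length ∨ x ∈ (endDay.take filterCost.length).map (fun e => e + 1) := by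
  have hlen : (filterCost.zip (startDay.zip endDay)).length = filterCost.length := by
    simp [List.length_zip]; omega
  constructor
  · rintro ⟨t, ht, h⟩
    obtain ⟨i, hi, rfl⟩ := List.mem_iff_getElem.mp ht
    rw [hlen] at hi
    have hg : (filterCost.zip (startDay.zip endDay))[i]'(by rw [hlen]; exact hi)
        = (filterCost[i], (startDay[i]'(by omega), endDay[i]'(by omega))) := by
      simp [List.getElem_zip]
    rw [hg] at h
    rcases h with rfl | rfl
    · left
      rw [List.mem_iff_getElem]
      exact ⟨i, by simp; omega, by simp⟩
    · right
      rw [List.mem_map]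
      refine ⟨endDay[i]'(by omega), ?_, rfl⟩
      rw [List.mem_iff_getElem]
      exact ⟨i, by simp; omega, by simp⟩
  · rintro (hx | hx)
    · obtain ⟨i, hi, rfl⟩ := List.mem_iff_getElem.mp hx
      simp only [List.length_take] at hi
      refine ⟨(filterCost.zip (startDay.zip endDay))[i]'(by omega), List.getElem_mem _, ?_⟩
      simp [List.getElem_zip]
    · obtain ⟨e, he', rfl⟩ := List.mem_map.mp hx
      obtain ⟨i, hi, rfl⟩ := List.mem_iff_getElem.mp he'
      simp only [List.length_take] at hi
      refine ⟨(filterCost.zip (startDay.zip endDay))[i]'(by omega), List.getElem_mem _, ?_⟩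
      simp [List.getElem_zip]

lemma pv_chain (l : List Int) (h : l.Pairwise (· < ·)) :
    List.IsChain (fun x y => x < y ∧ ∀ b ∈ l, x < b → y ≤ b) l := by
  rw [List.isChain_iff_getElem]
  intro i hi
  have hg := List.pairwise_iff_getElem.mp h
  refine ⟨hg i (i+1) (by omega) hi (by omega), ?_⟩
  intro b hb hlt
  obtain ⟨j, hj, rfl⟩ := List.mem_iff_getElem.mp hb
  rcases lt_trichotomy j (i+1) with hc | hc | hc
  · rcases Nat.lt_or_ge j i with hc2 | hc2
    · exact absurd (hg j i hj (by omega) hc2) (by omega)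
    · have hji : j = i := by omega
      subst hji; omega
  · subst hc; exact le_rfl
  · exact le_of_lt (hg (i+1) j hi hj hc)

lemma pv_ind_step (s prev day : Int) (B : List Int) (hsB : s ∈ B) (hpd : prev < day)
    (hadj : ∀ b ∈ B, prev < b → day ≤ b) :
    (if s ≤ day then (1:Int) else 0) = (if s ≤ prev then 1 else 0) + (if s = day then 1 else 0) := by
  by_cases hc : s ≤ prev
  · have h1 : s ≤ day := by omega
    have h2 : ¬ s = day := by omega
    simp [hc, h1, h2]
  · have hds : day ≤ s := hadj s hsB (by omega)
    have h1 : ¬ s ≤ prev := by omega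
    by_cases h2 : s = day
    · simp [h2]
      omega
    · have h3 : ¬ s ≤ day := by omega
      simp [h1, h2, h3]

lemma pv_R_step (zl : List (Int × Int × Int)) (B : List Int) (prev day : Int)
    (hpd : prev < day) (hadj : ∀ b ∈ B, prev < b → day ≤ b)
    (hmem : ∀ t ∈ zl, t.2.1 ∈ B ∧ t.2.2 + 1 ∈ B) :
    pvR zl day = pvR zl prev + pvE zl day := by
  induction zl with
  | nil => simp [pvR, pvE]
  | cons t zl ih =>
    simp only [pvR, pvE, List.map_cons, List.sum_cons] at *
    rw [pv_ind_step t.2.1 prev day B (hmem t (List.mem_cons_self)).1 hpd hadj,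
      pv_ind_step (t.2.2 + 1) prev day B (hmem t (List.mem_cons_self)).2 hpd hadj,
      ih (fun u hu => hmem u (List.mem_cons_of_mem t hu))]
    ring

lemma pv_ind_head (s d0 : Int) (B : List Int) (hsB : s ∈ B) (hmin : ∀ b ∈ B, d0 ≤ b) :
    (if s ≤ d0 then (1:Int) else 0) = (if s = d0 then 1 else 0) := by
  have := hmin s hsB
  by_cases h : s = d0
  · simp [h]
  · have h2 : ¬ s ≤ d0 := by omega
    simp [h, h2]

lemma pv_R_head (zl : List (Int × Int × Int)) (B : List Int) (d0 : Int)
    (hmin : ∀ b ∈ B, d0 ≤ b) (hmem : ∀ t ∈ zl, t.2.1 ∈ B ∧ t.2.2 + 1 ∈ B) :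
    pvR zl d0 = pvE zl d0 := by
  induction zl with
  | nil => simp [pvR, pvE]
  | cons t zl ih =>
    simp only [pvR, pvE, List.map_cons, List.sum_cons] at *
    rw [pv_ind_head t.2.1 d0 B (hmem t (List.mem_cons_self)).1 hmin,
      pv_ind_head (t.2.2 + 1) d0 B (hmem t (List.mem_cons_self)).2 hmin,
      ih (fun u hu => hmem u (List.mem_cons_of_mem t hu))]

lemma pv_loop (ev : PySem.Dict Int Int) (zl : List (Int × Int × Int)) (P : Int) (B : List Int)
    (hev : ∀ k, ev.getD k 0 = pvE zl k)
    (hmem : ∀ t ∈ zl, t.2.1 ∈ B ∧ t.2.2 + 1 ∈ B) :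
    ∀ (rest : List Int) (prev ans : Int),
    List.IsChain (fun x y => x < y ∧ ∀ b ∈ B, x < b → y ≤ b) (prev :: rest) →
    (rest.foldl (fun (st : Int × Option Int × Int) day =>
      match st.2.1 with
      | some p => (PySem.Int.mod (st.1 + (min P st.2.2) * (day - p)) 10000009,
                   some day, st.2.2 + ev.getD day 0)
      | none => (st.1, some day, st.2.2 + ev.getD day 0)) (ans, some prev, pvR zl prev)).1
    = ((prev :: rest).zip rest).foldl (fun ans p =>
        PySem.Int.mod (ans + (min P (pvR zl p.1)) * (p.2 - p.1)) 10000009) ans := by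
  intro rest
  induction rest with
  | nil => intro prev ans _; simp
  | cons day rest ih =>
    intro prev ans hch
    rw [List.isChain_cons_cons] at hch
    obtain ⟨⟨hpd, hadj⟩, hch'⟩ := hch
    have hrun : pvR zl prev + ev.getD day 0 = pvR zl day := by
      rw [hev, (pv_R_step zl B prev day hpd hadj hmem)]
    simp only [List.foldl_cons, List.zip_cons_cons]
    rw [hrun, ih day _ hch']

-- ===== VERDICT (by name: the statement is the Claim_ definition above) =====
theorem getMinProcessingCost_spec : Claim_equal_getMinProcessingCost := by
  intro filterCost startDay endDay discountPrice _ hpre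
  obtain ⟨hs, he⟩ := hpre
  show getMinProcessingCost filterCost startDay endDay discountPrice
    = getMinProcessingCost_alt filterCost startDay endDay discountPrice
  unfold getMinProcessingCost getMinProcessingCost_alt
  simp only [PySem.List.slice_to_natCast, pvActive_eq]
  rw [pv_build_eq filterCost startDay endDay hs he]
  set zl := filterCost.zip (startDay.zip endDay) with hzl
  set ev := (pvPairs zl).foldl (fun d p => d.modify p.1 0 (fun v => v + p.2)) PySem.Dict.empty
    with hev
  have hgetD : ∀ k, ev.getD k 0 = pvE zl k := by
    intro k
    rw [hev, pv_getD_foldl_modify, pv_filter_sum_eq_E]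
    simp
  have hkeys := pv_keys (pvPairs zl)
  have hnd := pv_nodup_keys (pvPairs zl)
  rw [← hev] at hkeys hnd
  have hndU : (PySem.Set.union (PySem.Set.ofList (startDay.take filterCost.length))
      (PySem.Set.ofList ((endDay.take filterCost.length).map (fun e => e + 1)))).Nodup :=
    PySem.Set.nodup_union _ _ (PySem.Set.nodup_ofList _)
  have hmemU : ∀ x, x ∈ ev.keys ↔ x ∈ PySem.Set.union
      (PySem.Set.ofList (startDay.take filterCost.length))
      (PySem.Set.ofList ((endDay.take filterCost.length).map (fun e => e + 1))) := by
    intro x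
    rw [hkeys, PySem.Set.mem_ofList, pv_mem_pairs_fst,
      pv_mem_zip filterCost startDay endDay hs he x,
      PySem.Set.mem_union, PySem.Set.mem_ofList, PySem.Set.mem_ofList]
  have hperm : ev.keys.Perm (PySem.Set.union
      (PySem.Set.ofList (startDay.take filterCost.length))
      (PySem.Set.ofList ((endDay.take filterCost.length).map (fun e => e + 1)))) :=
    (List.perm_ext_iff_of_nodup hnd hndU).mpr hmemU
  rw [← PySem.List.sorted_eq_sorted_of_perm _ _ (fun x => x) (fun _ _ h => h) hperm]
  set days := PySem.List.sorted ev.keys (fun x => x) false with hdays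
  have hdperm : days.Perm ev.keys := PySem.List.sorted_perm _ _ _
  have hndd : days.Nodup := hdperm.nodup_iff.mpr hnd
  have hle : days.Pairwise (fun a b => a ≤ b) := PySem.List.sorted_pairwise _ _
  have hpw : days.Pairwise (· < ·) :=
    (hle.and hndd).imp (fun h => lt_of_le_of_ne h.1 h.2)
  have hmemt : ∀ t ∈ zl, t.2.1 ∈ days ∧ t.2.2 + 1 ∈ days := by
    intro t ht
    constructor
    · rw [hdays, PySem.List.mem_sorted, hkeys, PySem.Set.mem_ofList, pv_mem_pairs_fst]
      exact ⟨t, ht, Or.inl rfl⟩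
    · rw [hdays, PySem.List.mem_sorted, hkeys, PySem.Set.mem_ofList, pv_mem_pairs_fst]
      exact ⟨t, ht, Or.inr rfl⟩
  cases hd : days with
  | nil => simp
  | cons d0 rest =>
    have hsortedcons : PySem.List.sorted ev.keys (fun x => x) false = d0 :: rest := by
      rw [← hdays]; exact hd
    have hmin : ∀ b ∈ days, d0 ≤ b := by
      intro b hb
      have hbk : b ∈ ev.keys := by
        rw [hdays] at hb
        exact (PySem.List.mem_sorted ev.keys (fun x => x) false b).mp hb
      exact PySem.List.key_head_sorted_le ev.keys (fun x => x) hsortedcons b hbk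
    have hch := pv_chain days hpw
    rw [hd] at hch hmemt hmin
    simp only [List.foldl_cons, List.tail_cons]
    have hfirst : ((0 : Int), some d0, (0 : Int) + ev.getD d0 0)
        = ((0 : Int), some d0, pvR zl d0) := by
      rw [hgetD, zero_add, pv_R_head zl (d0 :: rest) d0 hmin hmemt]
    rw [hfirst]
    exact pv_loop ev zl discountPrice (d0 :: rest) hgetD hmemt rest d0 0 hch
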